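-- pv_equiv track=rewrite | github.com/kitlevy/voting-research | preflib-voting-sim/preflib_helpers.py | compare_a_over_b
-- ===== SOURCE A (Python) =====
-- def compare_a_over_b(rankings, weights, alt_a, alt_b):
--     a_over_b = 0
--     for row, ranking in enumerate(rankings):
--         a_rank = b_rank = len(ranking) + 1
--         for i, alt in enumerate(ranking):
--             if alt == alt_a:
--                 a_rank = i
--             elif alt == alt_b:
--                 b_rank = i
--             if a_rank <= len(ranking) and b_rank <= len(ranking):
--                 break
--         if a_rank < b_rank:
--             a_over_b += weights[row][0]
--     return a_over_b
-- ===== SOURCE B (Python) =====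
-- def ranks_a_first(ranking, alt_a, alt_b):
--     return alt_a in ranking and alt_b not in ranking[:ranking.index(alt_a)]
--
-- def compare_a_over_b(rankings, weights, alt_a, alt_b):
--     return sum(weights[row][0]
--                for row, ranking in enumerate(rankings)
--                if ranks_a_first(ranking, alt_a, alt_b))
-- ===== Notes on version B (the rewrite author's own statement) =====
-- stated objective: simpler
-- what changed: B drops A's two rank registers and break-scan entirely: a row counts iff alt_a is a member and alt_b does not occur in the prefix slice before alt_a's first index (membership + index + slice), summed by a comprehension over enumerate.
import Mathlib
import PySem

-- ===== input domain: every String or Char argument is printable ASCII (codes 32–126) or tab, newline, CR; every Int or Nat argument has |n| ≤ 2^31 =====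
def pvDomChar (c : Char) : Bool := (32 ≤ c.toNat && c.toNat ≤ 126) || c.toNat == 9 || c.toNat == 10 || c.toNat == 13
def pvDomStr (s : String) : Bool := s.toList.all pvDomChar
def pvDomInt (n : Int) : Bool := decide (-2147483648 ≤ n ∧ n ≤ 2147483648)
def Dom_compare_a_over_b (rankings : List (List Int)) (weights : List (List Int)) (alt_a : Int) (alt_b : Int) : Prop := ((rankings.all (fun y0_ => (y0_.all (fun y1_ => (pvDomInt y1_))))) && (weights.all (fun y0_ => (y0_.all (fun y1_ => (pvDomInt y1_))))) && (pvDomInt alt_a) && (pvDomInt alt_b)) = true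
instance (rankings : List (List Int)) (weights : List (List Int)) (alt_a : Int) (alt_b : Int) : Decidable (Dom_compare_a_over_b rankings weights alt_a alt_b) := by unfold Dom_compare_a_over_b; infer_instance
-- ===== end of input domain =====

-- B replaces A's rank-register break-scan by a per-row membership/index/prefix-slice test
-- (alt_a in r and alt_b not in r[:r.index(alt_a)]) summed over enumerate (objective: simpler).

-- ===== PORT A =====
-- inner loop of A: tracks a_rank/b_rank, breaks once both ≤ len(ranking)
def pvRowScan (alt_a alt_b n : Int) : Int → List Int → Int → Int → Int × Int
  | _, [], a, b => (a, b)
  | i, alt :: rest, a, b =>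
    let a' := if alt = alt_a then i else a
    let b' := if alt ≠ alt_a ∧ alt = alt_b then i else b
    if a' ≤ n ∧ b' ≤ n then (a', b')
    else pvRowScan alt_a alt_b n (i + 1) rest a' b'

-- outer loop of A: 'for row, ranking in enumerate(rankings)' with accumulator
def pvALoop (weights : List (List Int)) (alt_a alt_b : Int) : Int → List (List Int) → Int → Int
  | _, [], acc => acc
  | row, ranking :: rest, acc =>
    let n : Int := ranking.length
    let r := pvRowScan alt_a alt_b n 0 ranking (n + 1) (n + 1)
    let acc' := if r.1 < r.2
      then acc + (((PySem.List.pyGet? weights row).bind (fun w => PySem.List.pyGet? w 0)).getD 0)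
      else acc
    pvALoop weights alt_a alt_b (row + 1) rest acc'

def compare_a_over_b (rankings : List (List Int)) (weights : List (List Int)) (alt_a : Int) (alt_b : Int) : Int :=
  pvALoop weights alt_a alt_b 0 rankings 0

-- ===== PORT B =====
-- helper ranks_a_first of Source B: alt_a in ranking and alt_b not in ranking[:ranking.index(alt_a)]
-- (the 'and' short-circuits, so the index's getD default is never reached on a counted row)
def pvRanksAFirst (ranking : List Int) (alt_a alt_b : Int) : Bool :=
  ranking.contains alt_a &&
    !((PySem.List.slice ranking none
        (some (((PySem.List.index? ranking alt_a).getD 0 : Nat) : Int))).contains alt_b)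

def compare_a_over_b_alt (rankings : List (List Int)) (weights : List (List Int)) (alt_a : Int) (alt_b : Int) : Int :=
  ((PySem.List.enumerate rankings 0).filter (fun p => pvRanksAFirst p.2 alt_a alt_b)).foldl
    (fun acc p => acc + (((PySem.List.pyGet? weights p.1).bind (fun w => PySem.List.pyGet? w 0)).getD 0)) 0

-- ===== PRECONDITION & SPEC =====
-- Pre_ excludes exactly the inputs on which Python A raises IndexError: some row whose
-- ranking mentions alt_a before alt_b (so A reads weights[row][0]) has no nonempty weight row.
def Pre_compare_a_over_b (rankings : List (List Int)) (weights : List (List Int)) (alt_a : Int) (alt_b : Int) : Prop :=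
  ∀ i : Nat, i < rankings.length →
    ((rankings[i]?.getD []).find? (fun x => x == alt_a || x == alt_b) = some alt_a) →
    (weights[i]?.getD []) ≠ []
instance (rankings : List (List Int)) (weights : List (List Int)) (alt_a : Int) (alt_b : Int) : Decidable (Pre_compare_a_over_b rankings weights alt_a alt_b) := by unfold Pre_compare_a_over_b; infer_instance
def pvWitness_compare_a_over_b : List (List Int) × List (List Int) × Int × Int :=
  ([[1, 2], [2, 1]], [[3], [5]], 1, 2)

def Spec_compare_a_over_b (rankings : List (List Int)) (weights : List (List Int)) (alt_a : Int) (alt_b : Int) (out : Int) : Prop := out = compare_a_over_b_alt rankings weights alt_a alt_b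
instance (rankings : List (List Int)) (weights : List (List Int)) (alt_a : Int) (alt_b : Int) (out : Int) : Decidable (Spec_compare_a_over_b rankings weights alt_a alt_b out) := by unfold Spec_compare_a_over_b; infer_instance

-- ===== CLAIM (what is proved, stated in full; the proofs are below) =====
def Claim_equal_compare_a_over_b : Prop := ∀ (rankings : List (List Int)) (weights : List (List Int)) (alt_a : Int) (alt_b : Int), Dom_compare_a_over_b rankings weights alt_a alt_b → Pre_compare_a_over_b rankings weights alt_a alt_b → Spec_compare_a_over_b rankings weights alt_a alt_b (compare_a_over_b rankings weights alt_a alt_b)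

-- ===== LEMMAS AND PROOFS =====

-- once alt_a has been seen (at index a < i), the row always counts
lemma pvScanA (alt_a alt_b n : Int) :
    ∀ (rest : List Int) (i a : Int), a < i → a ≤ n → i + (rest.length : Int) ≤ n →
      (pvRowScan alt_a alt_b n i rest a (n + 1)).1 < (pvRowScan alt_a alt_b n i rest a (n + 1)).2 := by
  intro rest
  induction rest with
  | nil => intro i a h1 h2 h3; simp [pvRowScan]; omega
  | cons alt t ih =>
    intro i a h1 h2 h3
    simp only [List.length_cons] at h3
    push_cast at h3
    simp only [pvRowScan]
    by_cases ha : alt = alt_a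
    · have e1 : (if alt = alt_a then i else a) = i := if_pos ha
      have e2 : (if alt ≠ alt_a ∧ alt = alt_b then i else n + 1) = n + 1 :=
        if_neg (fun hc => hc.1 ha)
      rw [e1, e2, if_neg (by omega : ¬ (i ≤ n ∧ n + 1 ≤ n))]
      exact ih (i + 1) i (by omega) (by omega) (by omega)
    · have e1 : (if alt = alt_a then i else a) = a := if_neg ha
      by_cases hb : alt = alt_b
      · have e2 : (if alt ≠ alt_a ∧ alt = alt_b then i else n + 1) = i := if_pos ⟨ha, hb⟩
        rw [e1, e2, if_pos (⟨h2, by omega⟩ : a ≤ n ∧ i ≤ n)]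
        simpa using h1
      · have e2 : (if alt ≠ alt_a ∧ alt = alt_b then i else n + 1) = n + 1 :=
          if_neg (fun hc => hb hc.2)
        rw [e1, e2, if_neg (by omega : ¬ (a ≤ n ∧ n + 1 ≤ n))]
        exact ih (i + 1) a (by omega) h2 (by omega)

-- once alt_b has been seen first (at index b < i), the row never counts
lemma pvScanB (alt_a alt_b n : Int) :
    ∀ (rest : List Int) (i b : Int), b < i → b ≤ n → i + (rest.length : Int) ≤ n →
      ¬ ((pvRowScan alt_a alt_b n i rest (n + 1) b).1 < (pvRowScan alt_a alt_b n i rest (n + 1) b).2) := by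
  intro rest
  induction rest with
  | nil => intro i b h1 h2 h3; simp [pvRowScan]; omega
  | cons alt t ih =>
    intro i b h1 h2 h3
    simp only [List.length_cons] at h3
    push_cast at h3
    simp only [pvRowScan]
    by_cases ha : alt = alt_a
    · have e1 : (if alt = alt_a then i else n + 1) = i := if_pos ha
      have e2 : (if alt ≠ alt_a ∧ alt = alt_b then i else b) = b :=
        if_neg (fun hc => hc.1 ha)
      rw [e1, e2, if_pos (⟨by omega, h2⟩ : i ≤ n ∧ b ≤ n)]
      simp; omega
    · have e1 : (if alt = alt_a then i else n + 1) = n + 1 := if_neg ha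
      by_cases hb : alt = alt_b
      · have e2 : (if alt ≠ alt_a ∧ alt = alt_b then i else b) = i := if_pos ⟨ha, hb⟩
        rw [e1, e2, if_neg (by omega : ¬ (n + 1 ≤ n ∧ i ≤ n))]
        exact ih (i + 1) i (by omega) (by omega) (by omega)
      · have e2 : (if alt ≠ alt_a ∧ alt = alt_b then i else b) = b :=
          if_neg (fun hc => hb hc.2)
        rw [e1, e2, if_neg (by omega : ¬ (n + 1 ≤ n ∧ b ≤ n))]
        exact ih (i + 1) b (by omega) h2 (by omega)

-- main row characterisation of A: A's count test ↔ alt_a is the first of {alt_a, alt_b} in the rest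
lemma pvScanMain (alt_a alt_b n : Int) :
    ∀ (rest : List Int) (i : Int), i + (rest.length : Int) ≤ n →
      (((pvRowScan alt_a alt_b n i rest (n + 1) (n + 1)).1 <
        (pvRowScan alt_a alt_b n i rest (n + 1) (n + 1)).2) ↔
        rest.find? (fun x => x == alt_a || x == alt_b) = some alt_a) := by
  intro rest
  induction rest with
  | nil => intro i h; simp [pvRowScan]
  | cons alt t ih =>
    intro i h
    simp only [List.length_cons] at h
    push_cast at h
    simp only [pvRowScan]
    by_cases ha : alt = alt_a
    · have e1 : (if alt = alt_a then i else n + 1) = i := if_pos ha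
      have e2 : (if alt ≠ alt_a ∧ alt = alt_b then i else n + 1) = n + 1 :=
        if_neg (fun hc => hc.1 ha)
      rw [e1, e2, if_neg (by omega : ¬ (i ≤ n ∧ n + 1 ≤ n))]
      have hl := pvScanA alt_a alt_b n t (i + 1) i (by omega) (by omega) (by omega)
      have hr : (alt :: t).find? (fun x => x == alt_a || x == alt_b) = some alt_a := by
        rw [List.find?_cons_of_pos (by simp [ha]), ha]
      exact ⟨fun _ => hr, fun _ => hl⟩
    · have e1 : (if alt = alt_a then i else n + 1) = n + 1 := if_neg ha
      by_cases hb : alt = alt_b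
      · have e2 : (if alt ≠ alt_a ∧ alt = alt_b then i else n + 1) = i := if_pos ⟨ha, hb⟩
        rw [e1, e2, if_neg (by omega : ¬ (n + 1 ≤ n ∧ i ≤ n))]
        have hl := pvScanB alt_a alt_b n t (i + 1) i (by omega) (by omega) (by omega)
        have hr : (alt :: t).find? (fun x => x == alt_a || x == alt_b) = some alt :=
          List.find?_cons_of_pos (by simp [hb])
        constructor
        · intro hlt; exact absurd hlt hl
        · intro hf; rw [hr] at hf; exact absurd (Option.some.inj hf) ha
      · have e2 : (if alt ≠ alt_a ∧ alt = alt_b then i else n + 1) = n + 1 :=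
          if_neg (fun hc => hb hc.2)
        rw [e1, e2, if_neg (by omega : ¬ (n + 1 ≤ n ∧ n + 1 ≤ n))]
        rw [List.find?_cons_of_neg (by simp [ha, hb])]
        exact ih (i + 1) (by omega)

-- B's row test ↔ the same find? characterisation
lemma pvRowChar (alt_a alt_b : Int) :
    ∀ (r : List Int), pvRanksAFirst r alt_a alt_b = true ↔
      r.find? (fun x => x == alt_a || x == alt_b) = some alt_a := by
  intro r
  induction r with
  | nil => simp [pvRanksAFirst]
  | cons x t ih =>
    by_cases ha : x = alt_a
    · subst ha
      constructor
      · intro _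
        exact List.find?_cons_of_pos (by simp)
      · intro _
        simp only [pvRanksAFirst, PySem.List.index?_cons_self, Option.getD_some, Nat.cast_zero]
        rw [PySem.List.slice_to _ (by norm_num)]
        simp
    · have hne : x ≠ alt_a := ha
      have hidx := PySem.List.index?_cons_of_ne (x := x) (v := alt_a) t hne
      by_cases hb : x = alt_b
      · subst hb
        constructor
        · intro hT
          exfalso
          simp only [pvRanksAFirst, Bool.and_eq_true, Bool.not_eq_true'] at hT
          obtain ⟨hmem, hslice⟩ := hT
          have hmt : alt_a ∈ t := by
            have hmem' : alt_a ∈ x :: t := by simpa using hmem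
            rcases List.mem_cons.mp hmem' with h | h
            · exact absurd h.symm hne
            · exact h
          obtain ⟨i, hi⟩ := Option.isSome_iff_exists.mp
            ((PySem.List.index?_isSome_iff t alt_a).mpr hmt)
          rw [hidx, hi] at hslice
          simp only [Option.map_some, Option.getD_some] at hslice
          rw [PySem.List.slice_to_natCast] at hslice
          simp [List.take_succ_cons] at hslice
        · intro hf
          rw [List.find?_cons_of_pos (by simp)] at hf
          exact absurd (Option.some.inj hf) hne
      · rw [List.find?_cons_of_neg (by simp [ha, hb]), ← ih]
        simp only [pvRanksAFirst, hidx]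
        have hmemeq : ((x :: t).contains alt_a) = (t.contains alt_a) := by
          simp
          intro h
          exact absurd h.symm hne
        rw [hmemeq]
        cases hio : PySem.List.index? t alt_a with
        | none =>
          have hnm : alt_a ∉ t := (PySem.List.index?_eq_none_iff t alt_a).mp hio
          simp [hnm]
        | some i =>
          simp only [Option.map_some, Option.getD_some]
          rw [PySem.List.slice_to_natCast, PySem.List.slice_to_natCast]
          simp [List.take_succ_cons]
          exact fun _ _ h => hb h.symm

-- B's foldl pulls out its accumulator
lemma pvFoldAdd (g : Int × List Int → Int) :
    ∀ (l : List (Int × List Int)) (acc : Int),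
      l.foldl (fun a p => a + g p) acc = acc + l.foldl (fun a p => a + g p) 0 := by
  intro l
  induction l with
  | nil => simp
  | cons p t ih => intro acc; simp only [List.foldl_cons]; rw [ih (acc + g p), ih (0 + g p)]; omega

-- loop correspondence: A's indexed loop from row k equals B's fold over enumerate from k
lemma pvLoopEq (alt_a alt_b : Int) (weights : List (List Int)) :
    ∀ (rankings : List (List Int)) (k : Int) (acc : Int),
      pvALoop weights alt_a alt_b k rankings acc =
        acc + ((PySem.List.enumerate rankings k).filter (fun p => pvRanksAFirst p.2 alt_a alt_b)).foldl
          (fun a p => a + (((PySem.List.pyGet? weights p.1).bind (fun w => PySem.List.pyGet? w 0)).getD 0)) 0 := by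
  intro rankings
  induction rankings with
  | nil => intro k acc; simp [pvALoop, PySem.List.enumerate_nil]
  | cons ranking rest ih =>
    intro k acc
    simp only [pvALoop, PySem.List.enumerate_cons, List.filter_cons]
    have hscan := pvScanMain alt_a alt_b (ranking.length : Int) ranking 0 (by omega)
    by_cases hc : ranking.find? (fun x => x == alt_a || x == alt_b) = some alt_a
    · rw [if_pos (hscan.mpr hc), if_pos ((pvRowChar alt_a alt_b ranking).mpr hc)]
      simp only [List.foldl_cons]
      rw [ih, pvFoldAdd (fun p => ((PySem.List.pyGet? weights p.1).bind (fun w => PySem.List.pyGet? w 0)).getD 0) _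
        (0 + ((PySem.List.pyGet? weights k).bind (fun w => PySem.List.pyGet? w 0)).getD 0)]
      omega
    · rw [if_neg (fun h => hc (hscan.mp h)),
        if_neg (by simpa using (fun h => hc ((pvRowChar alt_a alt_b ranking).mp h)))]
      exact ih (k + 1) acc

-- ===== VERDICT (by name: the statement is the Claim_ definition above) =====
theorem compare_a_over_b_spec : Claim_equal_compare_a_over_b := by
  intro rankings weights alt_a alt_b _ _
  unfold Spec_compare_a_over_b compare_a_over_b compare_a_over_b_alt
  have h := pvLoopEq alt_a alt_b weights rankings 0 0
  simpa using h
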